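-- pv_equiv track=rewrite | github.com/Youngger9765/duotopia | backend/utils/payment_security.py | get_safe_transaction_display
-- ===== SOURCE A (Python) =====
-- from typing import Dict, Any
--
-- def get_safe_transaction_display(
--     transaction_metadata: Dict[str, Any]
-- ) -> Dict[str, Any]:
--     """
--     取得安全的交易顯示資料（給前端用）
--
--     Args:
--         transaction_metadata: 交易 metadata
--
--     Returns:
--         安全的顯示資料
--     """
--     safe_data = {}
--
--     # 只顯示安全的欄位
--     safe_fields = [
--         "transaction_id",
--         "payment_method",
--         "card_last_four",
--         "bank_name",
--         "created_at",
--         "status",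
--     ]
--
--     for field in safe_fields:
--         if field in transaction_metadata:
--             safe_data[field] = transaction_metadata[field]
--
--     return safe_data
-- ===== SOURCE B (Python) =====
-- def get_safe_transaction_display(transaction_metadata):
--     # rank doubles as the whitelist (membership) and as the display-order sort key
--     rank = {
--         "transaction_id": 0,
--         "payment_method": 1,
--         "card_last_four": 2,
--         "bank_name": 3,
--         "created_at": 4,
--         "status": 5,
--     }
--     items = [(k, v) for k, v in transaction_metadata.items() if k in rank]
--     items.sort(key=lambda kv: rank[kv[0]])
--     return dict(items)
-- ===== Notes on version B (the rewrite author's own statement) =====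
-- stated objective: alternative
-- what changed: Instead of probing the dict once per whitelist field and building the result field-by-field, B makes one pass over the input items filtering by a rank dict, then sorts the kept items by their whitelist rank and builds the dict from that list.
import Mathlib
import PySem

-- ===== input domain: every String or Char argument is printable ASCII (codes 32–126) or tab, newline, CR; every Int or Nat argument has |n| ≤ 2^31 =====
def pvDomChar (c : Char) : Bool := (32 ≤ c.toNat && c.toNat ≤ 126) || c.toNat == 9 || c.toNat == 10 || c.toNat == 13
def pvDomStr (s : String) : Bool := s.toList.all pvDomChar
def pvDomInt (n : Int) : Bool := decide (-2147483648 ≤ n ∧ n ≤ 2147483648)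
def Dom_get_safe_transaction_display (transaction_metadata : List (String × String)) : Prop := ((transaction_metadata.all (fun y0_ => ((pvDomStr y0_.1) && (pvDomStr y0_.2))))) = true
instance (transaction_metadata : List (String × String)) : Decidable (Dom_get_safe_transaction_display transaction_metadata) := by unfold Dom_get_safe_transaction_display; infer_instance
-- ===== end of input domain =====

-- B replaces A's per-whitelist-field dict probing by one filter pass over the items plus a
-- stable sort by whitelist rank (objective: alternative decomposition, same cost).
-- The proof is about the RETURN value; neither program mutates its argument (B sorts a fresh list).

-- ===== PORT A =====
def pvSafeFields : List String :=
  ["transaction_id", "payment_method", "card_last_four", "bank_name", "created_at", "status"]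

-- 'for field in safe_fields: if field in md: safe_data[field] = md[field]' — the 'in' guard and
-- the md[field] lookup are the same first-match probe, rendered as one 'get?' match.
def get_safe_transaction_display (transaction_metadata : List (String × String)) : List (String × String) :=
  (pvSafeFields.foldl (fun safe_data field =>
      match (PySem.Dict.mk transaction_metadata).get? field with
      | some v => safe_data.insert field v
      | none => safe_data)
    PySem.Dict.empty).items

-- ===== PORT B =====
def pvRank : PySem.Dict String Int :=
  PySem.Dict.ofList [("transaction_id", 0), ("payment_method", 1), ("card_last_four", 2),
                     ("bank_name", 3), ("created_at", 4), ("status", 5)]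

-- rank[kv[0]] is looked up via getD 0; exact because the filter keeps only keys present in rank.
def get_safe_transaction_display_alt (transaction_metadata : List (String × String)) : List (String × String) :=
  let items := transaction_metadata.filter (fun kv => pvRank.contains kv.1)
  let sortedItems := PySem.List.sorted items (fun kv => pvRank.getD kv.1 0)
  (PySem.Dict.ofList sortedItems).items

-- ===== PRECONDITION & SPEC =====
-- Pre_ excludes association lists with duplicate keys: they do not encode a Python dict (A's
-- parameter is a dict, which collapses duplicates before A runs), so first- vs last-match
-- behaviour there is an artefact of the list encoding, not of either program.
def Pre_get_safe_transaction_display (transaction_metadata : List (String × String)) : Prop :=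
  (transaction_metadata.map Prod.fst).Nodup
instance (transaction_metadata : List (String × String)) : Decidable (Pre_get_safe_transaction_display transaction_metadata) := by unfold Pre_get_safe_transaction_display; infer_instance

def pvWitness_get_safe_transaction_display : (List (String × String)) :=
  [("status", "paid"), ("amount", "500"), ("transaction_id", "t1")]

def Spec_get_safe_transaction_display (transaction_metadata : List (String × String)) (out : List (String × String)) : Prop := out = get_safe_transaction_display_alt transaction_metadata
instance (transaction_metadata : List (String × String)) (out : List (String × String)) : Decidable (Spec_get_safe_transaction_display transaction_metadata out) := by unfold Spec_get_safe_transaction_display; infer_instance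

-- ===== CLAIM (what is proved, stated in full; the proofs are below) =====
def Claim_equal_get_safe_transaction_display : Prop := ∀ (transaction_metadata : List (String × String)), Dom_get_safe_transaction_display transaction_metadata → Pre_get_safe_transaction_display transaction_metadata → Spec_get_safe_transaction_display transaction_metadata (get_safe_transaction_display transaction_metadata)

-- ===== LEMMAS AND PROOFS =====

-- the entry A emits for whitelist field f: (f, md[f]) when present
def pvPick (md : List (String × String)) (f : String) : Option (String × String) :=
  ((PySem.Dict.mk md).get? f).map (fun v => (f, v))

-- A's whitelist fold, characterised: it appends the picked entries in whitelist order
theorem pvFoldA_items (md : List (String × String)) :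
    ∀ (fields : List String) (d : PySem.Dict String String), fields.Nodup →
      (∀ f ∈ fields, d.contains f = false) →
      (fields.foldl (fun safe_data field =>
          match (PySem.Dict.mk md).get? field with
          | some v => safe_data.insert field v
          | none => safe_data) d).items
        = d.items ++ fields.filterMap (pvPick md) := by
  intro fields
  induction fields with
  | nil => intro d _ _; simp
  | cons f fs ih =>
    intro d hnd hdisj
    simp only [List.foldl_cons, List.filterMap_cons]
    cases hg : (PySem.Dict.mk md).get? f with
    | none =>
      rw [ih d (by simp_all) (fun g hg' => hdisj g (List.mem_cons_of_mem _ hg'))]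
      simp [pvPick, hg]
    | some v =>
      rw [ih (d.insert f v)
        (by simp_all)
        (by
          intro g hg'
          rw [PySem.Dict.contains_insert]
          have hne : g ≠ f := by
            rintro rfl; exact (List.nodup_cons.mp hnd).1 hg'
          simp [hne, hdisj g (List.mem_cons_of_mem _ hg')])]
      rw [PySem.Dict.items_insert_of_not_contains _ _ (hdisj f (List.mem_cons_self))]
      simp [pvPick, hg]

-- an entry of md is found by the first-match probe at its own key (keys Nodup)
theorem pvGet_mem (md : List (String × String)) (hnd : (md.map Prod.fst).Nodup)
    (p : String × String) :
    (PySem.Dict.mk md).get? p.1 = some p.2 ↔ p ∈ md := by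
  have := PySem.Dict.get?_eq_some_iff_mem_items (PySem.Dict.mk md) p.1 p.2 (by simpa [PySem.Dict.keys] using hnd)
  simpa using this

-- membership in pvRank is membership in the whitelist
set_option maxRecDepth 8192 in
theorem pvRank_contains (s : String) :
    pvRank.contains s = true ↔ s ∈ pvSafeFields := by
  have h : pvRank = PySem.Dict.mk
      [("transaction_id", (0:Int)), ("payment_method", 1), ("card_last_four", 2),
       ("bank_name", 3), ("created_at", 4), ("status", 5)] := by decide
  rw [h, PySem.Dict.contains_mk]
  simp only [pvSafeFields, List.any_cons, List.any_nil, List.mem_cons, List.not_mem_nil,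
    Bool.or_eq_true, beq_iff_eq, or_false]
  tauto

-- A's result list, via the fold characterisation
theorem pvA_eq (md : List (String × String)) :
    get_safe_transaction_display md = pvSafeFields.filterMap (pvPick md) := by
  rw [get_safe_transaction_display,
    pvFoldA_items md pvSafeFields PySem.Dict.empty (by decide) (by intro f _; simp)]
  simp [PySem.Dict.empty]

-- ===== VERDICT (by name: the statement is the Claim_ definition above) =====
theorem get_safe_transaction_display_spec : Claim_equal_get_safe_transaction_display := by
  intro md _hdom hnd
  unfold Spec_get_safe_transaction_display
  -- every picked entry carries its field as key and is an entry of md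
  have hpick_mem : ∀ f p, pvPick md f = some p → p.1 = f ∧ p ∈ md := by
    intro f p hp
    unfold pvPick at hp
    cases hg : (PySem.Dict.mk md).get? f with
    | none => rw [hg] at hp; simp at hp
    | some v =>
      rw [hg] at hp
      simp at hp
      subst hp
      exact ⟨rfl, (pvGet_mem md hnd (f, v)).mp hg⟩
  -- A's output is strictly increasing under the whitelist rank
  have hpairs : (pvSafeFields.filterMap (pvPick md)).Pairwise
      (fun a b => (fun kv : String × String => pvRank.getD kv.1 0) a
                < (fun kv : String × String => pvRank.getD kv.1 0) b) := by
    rw [List.pairwise_filterMap]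
    have horder : pvSafeFields.Pairwise (fun f g => pvRank.getD f 0 < pvRank.getD g 0) := by decide
    refine horder.imp_of_mem ?_
    intro f g _ _ hfg a ha b hb
    simp only
    rw [(hpick_mem f a ha).1, (hpick_mem g b hb).1]
    exact hfg
  have hLkeys : ((pvSafeFields.filterMap (pvPick md)).map Prod.fst).Nodup := by
    unfold List.Nodup
    rw [List.pairwise_map]
    exact hpairs.imp (fun hab h => ne_of_lt hab (congrArg (fun s => pvRank.getD s 0) h))
  have hLnd : (pvSafeFields.filterMap (pvPick md)).Nodup := List.Nodup.of_map _ hLkeys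
  -- A's output is a rearrangement of B's filter pass
  have hperm : (pvSafeFields.filterMap (pvPick md)).Perm
      (md.filter (fun kv => pvRank.contains kv.1)) := by
    rw [List.perm_ext_iff_of_nodup hLnd ((List.Nodup.of_map _ hnd).filter _)]
    intro a
    rw [List.mem_filterMap, List.mem_filter]
    constructor
    · rintro ⟨f, hf, hp⟩
      obtain ⟨h1, h2⟩ := hpick_mem f a hp
      exact ⟨h2, (pvRank_contains a.1).mpr (h1 ▸ hf)⟩
    · rintro ⟨hmem, hc⟩
      refine ⟨a.1, (pvRank_contains a.1).mp hc, ?_⟩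
      unfold pvPick
      rw [(pvGet_mem md hnd a).mpr hmem]
      rfl
  -- B: the sort names A's list, and rebuilding the dict keeps it
  rw [pvA_eq md]
  show _ = get_safe_transaction_display_alt md
  unfold get_safe_transaction_display_alt
  show List.filterMap (pvPick md) pvSafeFields =
    (PySem.Dict.ofList (PySem.List.sorted (List.filter (fun kv => pvRank.contains kv.1) md)
      (fun kv => pvRank.getD kv.1 0))).items
  rw [PySem.List.sorted_eq_of_perm_of_pairwise_lt _ _ _ hperm hpairs]
  have hfresh := PySem.Dict.items_foldl_insert_fresh (pvSafeFields.filterMap (pvPick md))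
    Prod.fst Prod.snd PySem.Dict.empty (by intro a _; simp) hLkeys
  simp only [PySem.Dict.ofList, PySem.Dict.update]
  rw [hfresh]
  simp [PySem.Dict.empty]
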